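-- pv_equiv track=rewrite | github.com/Bronte-Mckeown/Movie-Battery | Tasks/taskScripts/resources/Movie_Task/csv/randomize_probes_movie_task_auto.py | check_spacing
-- ===== SOURCE A (Python) =====
-- def check_spacing(numbers, min_participant_break, probe_interval):
--     """
--     This function ensures that within an order, probe durations do not repeat
--     and that there is sufficient spacing between probes.
--
--     Parameters
--     ----------
--     numbers : list
--         list of probe timings
--     min_participant_break : integer
--         min amount of time between probes for a person (in 'order' space)
--     probe_interval : integer
--         how many seconds between probes across participants
--
--     Returns
--     -------
--     bool
--         True or false; have conditions been met
--     encountered_spacings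
--         This is essential 'durations' between probes that we use later on
--
--     """
--     spacings = set()
--     encountered_spacings = []  # List to store encountered spacings
--
--     # Calculate first spacing by taking first probe and adding pre_clip secs
--     first_spacing = abs(numbers[0] - 0)
--
--     spacings.add(first_spacing)
--     encountered_spacings.append(first_spacing)
--
--     for i in range(len(numbers) - 1):
--         spacing = abs(numbers[i] - numbers[i+1])
--
--         if spacing < (min_participant_break / probe_interval) or spacing in spacings:
--             return False, []  # Return an empty list along with False
--
--         spacings.add(spacing)
--         encountered_spacings.append(spacing)  # Save the encountered spacing
--
--     return True, encountered_spacings  # Return True and the list of encountered spacings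
-- ===== SOURCE B (Python) =====
-- def check_spacing(numbers, min_participant_break, probe_interval):
--     # Build the full spacings list in one pass, then validate it wholesale.
--     spacings = [abs(numbers[0])] + [abs(a - b) for a, b in zip(numbers, numbers[1:])]
--     if len(set(spacings)) != len(spacings):
--         return False, []
--     if any(s < min_participant_break / probe_interval for s in spacings[1:]):
--         return False, []
--     return True, spacings
-- ===== Notes on version B (the rewrite author's own statement) =====
-- stated objective: simpler
-- what changed: B builds the complete spacings list in a single pass (first element plus consecutive absolute differences), then validates it wholesale: a duplicate check via set size and a threshold check over the tail, instead of A's incremental loop that threads a running set and output list with an early return inside the loop.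
import Mathlib
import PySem

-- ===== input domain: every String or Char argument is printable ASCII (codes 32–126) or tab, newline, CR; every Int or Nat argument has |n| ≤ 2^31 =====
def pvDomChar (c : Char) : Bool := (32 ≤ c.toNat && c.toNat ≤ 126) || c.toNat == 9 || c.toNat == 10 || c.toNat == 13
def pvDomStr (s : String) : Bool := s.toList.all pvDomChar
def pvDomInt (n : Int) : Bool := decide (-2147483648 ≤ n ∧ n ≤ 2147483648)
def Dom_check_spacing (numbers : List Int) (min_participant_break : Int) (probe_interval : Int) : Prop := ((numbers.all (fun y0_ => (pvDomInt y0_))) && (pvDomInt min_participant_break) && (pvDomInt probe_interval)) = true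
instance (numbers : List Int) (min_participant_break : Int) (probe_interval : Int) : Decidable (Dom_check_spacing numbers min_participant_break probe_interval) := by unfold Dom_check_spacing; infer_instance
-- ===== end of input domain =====

-- B builds the whole spacings list in one pass and validates it wholesale (duplicate check via
-- set size, threshold check on the tail slice) instead of A's incremental loop with a running
-- set; objective: simpler decomposition, same cost.

-- `s < mpb / pi` (Python float true division, compared against the int s): on the stated domain
-- |mpb|,|pi| ≤ 2^31 the rounded double of mpb/pi cannot cross an integer (|mpb/pi| ≤ 2^31/|pi|,
-- so the rounding error ulp/2 ≤ 2^-22/|pi| is below 1/|pi|, the least nonzero distance of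
-- mpb/pi to an integer), so the comparison equals the exact rational one, modelled here by
-- cross-multiplication.  Only evaluated with pi ≠ 0 under Pre_.
def pyLtDiv (s mpb pi : Int) : Bool :=
  if 0 < pi then decide (s * pi < mpb) else decide (mpb < s * pi)

-- ===== PORT A =====
-- the 'for i in range(len(numbers) - 1)' loop of A, carrying the running set and list
def checkLoopA (prev : Int) (rest : List Int) (spacings : PySem.Set Int) (enc : List Int)
    (mpb pi : Int) : Bool × List Int :=
  match rest with
  | [] => (true, enc)
  | y :: ys =>
    let s := |prev - y|
    if pyLtDiv s mpb pi || spacings.contains s then (false, [])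
    else checkLoopA y ys (spacings.add s) (enc ++ [s]) mpb pi

def check_spacing (numbers : List Int) (min_participant_break : Int) (probe_interval : Int) : Bool × List Int :=
  match numbers with
  | [] => (false, [])  -- unreachable: Python raises IndexError on numbers[0]; excluded by Pre_
  | x :: rest =>
    let first := |x - 0|
    checkLoopA x rest (PySem.Set.add PySem.Set.empty first) [first] min_participant_break probe_interval

-- ===== PORT B =====
-- [abs(a - b) for a, b in zip(numbers, numbers[1:])]
def diffsOf (numbers : List Int) : List Int :=
  (numbers.zip (PySem.List.slice numbers (some 1))).map (fun p => |p.1 - p.2|)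

def check_spacing_alt (numbers : List Int) (min_participant_break : Int) (probe_interval : Int) : Bool × List Int :=
  match numbers with
  | [] => (false, [])  -- unreachable: Python raises IndexError on numbers[0]; excluded by Pre_
  | x :: _ =>
    let spacings := |x| :: diffsOf numbers
    if PySem.Set.len (PySem.Set.ofList spacings) ≠ PySem.List.len spacings then (false, [])
    else if (PySem.List.slice spacings (some 1)).any
        (fun s => pyLtDiv s min_participant_break probe_interval) then (false, [])
    else (true, spacings)

-- ===== PRECONDITION & SPEC =====
-- Pre_ excludes exactly the inputs on which Python A raises: the empty list (IndexError on
-- numbers[0]) and probe_interval = 0 with at least two numbers (ZeroDivisionError in the loop).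
def Pre_check_spacing (numbers : List Int) (min_participant_break : Int) (probe_interval : Int) : Prop :=
  numbers ≠ [] ∧ (2 ≤ numbers.length → probe_interval ≠ 0)
instance (numbers : List Int) (min_participant_break : Int) (probe_interval : Int) : Decidable (Pre_check_spacing numbers min_participant_break probe_interval) := by unfold Pre_check_spacing; infer_instance
def pvWitness_check_spacing : List Int × Int × Int := ([3, 7], 2, 1)

def Spec_check_spacing (numbers : List Int) (min_participant_break : Int) (probe_interval : Int) (out : Bool × List Int) : Prop := out = check_spacing_alt numbers min_participant_break probe_interval
instance (numbers : List Int) (min_participant_break : Int) (probe_interval : Int) (out : Bool × List Int) : Decidable (Spec_check_spacing numbers min_participant_break probe_interval out) := by unfold Spec_check_spacing; infer_instance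

-- ===== CLAIM (what is proved, stated in full; the proofs are below) =====
def Claim_equal_check_spacing : Prop := ∀ (numbers : List Int) (min_participant_break : Int) (probe_interval : Int), Dom_check_spacing numbers min_participant_break probe_interval → Pre_check_spacing numbers min_participant_break probe_interval → Spec_check_spacing numbers min_participant_break probe_interval (check_spacing numbers min_participant_break probe_interval)

-- ===== LEMMAS AND PROOFS =====

-- proof-side mirror of diffsOf: the consecutive |differences| starting from prev, recursively
def dfs (prev : Int) : List Int → List Int
  | [] => []
  | y :: ys => |prev - y| :: dfs y ys

theorem diffsOf_singleton (x : Int) : diffsOf [x] = [] := by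
  simp [diffsOf, PySem.List.slice_from [x] (by norm_num : (0:Int) ≤ 1)]

theorem diffsOf_cons₂ (x y : Int) (ys : List Int) :
    diffsOf (x :: y :: ys) = |x - y| :: diffsOf (y :: ys) := by
  simp [diffsOf, PySem.List.slice_from _ (by norm_num : (0:Int) ≤ 1)]

theorem dfs_eq (rest : List Int) : ∀ x : Int, dfs x rest = diffsOf (x :: rest) := by
  induction rest with
  | nil => intro x; simp [dfs, diffsOf_singleton]
  | cons y ys ih => intro x; rw [diffsOf_cons₂]; simp [dfs, ih y]

theorem checkLoopA_char (mpb pi : Int) (rest : List Int) : ∀ (prev : Int) (S : PySem.Set Int) (enc : List Int),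
    checkLoopA prev rest S enc mpb pi =
      if (dfs prev rest).Nodup ∧ (∀ s ∈ dfs prev rest, s ∉ S) ∧ (∀ s ∈ dfs prev rest, pyLtDiv s mpb pi = false)
      then (true, enc ++ dfs prev rest) else (false, []) := by
  induction rest with
  | nil => intro prev S enc; simp [checkLoopA, dfs]
  | cons y ys ih =>
    intro prev S enc
    simp only [checkLoopA, dfs]
    by_cases hlt : pyLtDiv |prev - y| mpb pi = true
    · rw [if_pos (by simp [hlt]), if_neg]
      rintro ⟨-, -, h3⟩
      have := h3 |prev - y| (List.mem_cons_self ..)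
      simp [hlt] at this
    · by_cases hmem : (|prev - y|) ∈ S
      · rw [if_pos (by simp [hlt]; exact hmem), if_neg]
        rintro ⟨-, h2, -⟩
        exact h2 |prev - y| (List.mem_cons_self ..) hmem
      · rw [if_neg (by simp [hlt]; exact hmem), ih]
        have hiff : ((dfs y ys).Nodup ∧ (∀ s ∈ dfs y ys, s ∉ S.add |prev - y|) ∧
              (∀ s ∈ dfs y ys, pyLtDiv s mpb pi = false))
            ↔ ((|prev - y| :: dfs y ys).Nodup ∧ (∀ s ∈ |prev - y| :: dfs y ys, s ∉ S) ∧
              (∀ s ∈ |prev - y| :: dfs y ys, pyLtDiv s mpb pi = false)) := by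
          simp only [List.nodup_cons, List.mem_cons, forall_eq_or_imp, PySem.Set.mem_add,
            not_or, forall_and]
          constructor
          · rintro ⟨hnd, ⟨hS, hne⟩, hlt'⟩
            exact ⟨⟨List.forall_mem_ne'.mp hne, hnd⟩, ⟨hmem, hS⟩, Bool.eq_false_iff.2 hlt, hlt'⟩
          · rintro ⟨⟨hne, hnd⟩, ⟨-, hS⟩, -, hlt'⟩
            exact ⟨hnd, ⟨hS, List.forall_mem_ne'.mpr hne⟩, hlt'⟩
        exact if_congr hiff (by simp) rfl

theorem foldl_add_len_le (xs : List Int) : ∀ s : PySem.Set Int,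
    (xs.foldl PySem.Set.add s).length ≤ s.length + xs.length := by
  induction xs with
  | nil => intro s; simp
  | cons x xs ih =>
    intro s
    simp only [List.foldl_cons, List.length_cons]
    calc (xs.foldl PySem.Set.add (s.add x)).length ≤ (s.add x).length + xs.length := ih _
      _ ≤ s.length + (xs.length + 1) := by
          simp only [PySem.Set.add]
          split
          · omega
          · simp; omega

theorem foldl_add_len_iff (xs : List Int) : ∀ s : PySem.Set Int,
    ((xs.foldl PySem.Set.add s).length = s.length + xs.length ↔ xs.Nodup ∧ ∀ x ∈ xs, x ∉ s) := by
  induction xs with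
  | nil => intro s; simp
  | cons x xs ih =>
    intro s
    simp only [List.foldl_cons, List.length_cons, List.nodup_cons]
    by_cases hx : x ∈ s
    · have hadd : s.add x = s := by
        simp only [PySem.Set.add, if_pos ((PySem.Set.contains_iff s x).2 hx)]
      rw [hadd]
      constructor
      · intro h
        have := foldl_add_len_le xs s
        omega
      · rintro ⟨-, h⟩
        exact absurd hx (h x (List.mem_cons_self ..))
    · have hadd : s.add x = s ++ [x] := by
        have hc : s.contains x = false := by
          simp only [Bool.eq_false_iff]
          intro h
          exact absurd ((PySem.Set.contains_iff s x).1 h) hx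
        simp only [PySem.Set.add, hc, if_neg Bool.false_ne_true]
      rw [hadd, show List.length s + (xs.length + 1) = (s ++ [x]).length + xs.length by
        simp [List.length_append]; omega, ih]
      simp only [List.mem_append, not_or, List.mem_cons, forall_eq_or_imp, forall_and]
      constructor
      · rintro ⟨h1, h2, h3, -⟩
        exact ⟨⟨List.forall_mem_ne'.mp h3, h1⟩, hx, h2⟩
      · rintro ⟨⟨h0, h1⟩, -, h2⟩
        exact ⟨h1, h2, List.forall_mem_ne'.mpr h0, by simp⟩

theorem ofList_len_iff (xs : List Int) : ((PySem.Set.ofList xs).length = xs.length ↔ xs.Nodup) := by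
  have h := foldl_add_len_iff xs PySem.Set.empty
  simp only [PySem.Set.empty, List.length_nil, Nat.zero_add] at h
  rw [show PySem.Set.ofList xs = xs.foldl PySem.Set.add PySem.Set.empty from rfl]
  simp only [PySem.Set.empty]
  rw [h]
  simp

-- ===== VERDICT (by name: the statement is the Claim_ definition above) =====
theorem check_spacing_spec : Claim_equal_check_spacing := by
  intro numbers mpb pi hdom hpre
  unfold Spec_check_spacing
  cases numbers with
  | nil => rfl
  | cons x rest =>
    simp only [check_spacing, check_spacing_alt]
    rw [checkLoopA_char]
    rw [← dfs_eq rest x]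
    have hempty : (PySem.Set.add PySem.Set.empty |x - 0|) = [|x - 0|] := rfl
    rw [hempty]
    have hx0 : |x - (0:Int)| = |x| := by rw [sub_zero]
    rw [hx0]
    set d := dfs x rest with hd
    have hslice : PySem.List.slice (|x| :: d) (some 1) = d := by
      rw [PySem.List.slice_from _ (by norm_num : (0:Int) ≤ 1)]
      simp
    rw [hslice]
    have hlen2 : (PySem.Set.len (PySem.Set.ofList (|x| :: d)) = PySem.List.len (|x| :: d))
        ↔ (|x| :: d).Nodup := by
      rw [show PySem.Set.len (PySem.Set.ofList (|x| :: d))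
            = ((PySem.Set.ofList (|x| :: d)).length : Int) from rfl,
          show PySem.List.len (|x| :: d) = (((|x| :: d)).length : Int) from rfl,
          Int.natCast_inj]
      exact ofList_len_iff _
    rw [show (if PySem.Set.len (PySem.Set.ofList (|x| :: d)) ≠ PySem.List.len (|x| :: d)
          then ((false : Bool), ([] : List Int))
          else if d.any (fun s => pyLtDiv s mpb pi) then (false, []) else (true, |x| :: d))
        = (if ¬ (|x| :: d).Nodup
          then ((false : Bool), ([] : List Int))
          else if d.any (fun s => pyLtDiv s mpb pi) then (false, []) else (true, |x| :: d))
        from if_congr (not_congr hlen2) rfl rfl]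
    by_cases hnd : (|x| :: d).Nodup
    · rw [if_neg (not_not_intro hnd)]
      have hnd' := List.nodup_cons.1 hnd
      by_cases hany : d.any (fun s => pyLtDiv s mpb pi) = true
      · rw [if_pos hany, if_neg]
        rintro ⟨-, -, h3⟩
        obtain ⟨s, hs, hlt⟩ := List.any_eq_true.1 hany
        have := h3 s hs
        simp [this] at hlt
      · rw [if_neg hany, if_pos]
        · simp
        · refine ⟨hnd'.2, ?_, ?_⟩
          · intro s hs
            simp only [List.mem_singleton]
            rintro rfl
            exact hnd'.1 hs
          · intro s hs
            rcases Bool.eq_false_or_eq_true (pyLtDiv s mpb pi) with h | h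
            · exact absurd (List.any_eq_true.2 ⟨s, hs, h⟩) hany
            · exact h
    · rw [if_pos hnd, if_neg]
      rintro ⟨h1, h2, -⟩
      refine hnd (List.nodup_cons.2 ⟨?_, h1⟩)
      intro h
      exact h2 _ h (List.mem_singleton.2 rfl)
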